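-- pv_equiv track=rewrite | github.com/TheMightyTsar/SAVia.py | strHandler.py | seleccionar_palabras
-- ===== SOURCE A (Python) =====
-- def seleccionar_palabras(mensaje): #encontrar palabras buscando los espacios
--
--     palabras=[]
--     palabra=""
--     #empezamos a añadir las palabras a la lista
--     for e in range(0,len(mensaje)):
--         if mensaje[e] == " ":
--             if palabra not in palabras:
--                 palabras.append(palabra)
--
--             palabra=""
--         else:
--             palabra = palabra + (mensaje[e]).upper()
--             palabra.upper()
--     if palabra not in palabras:
--         palabras.append(palabra)
--
--
--     #comprobar validez, ¿son conectores?, palabras en una lista de conectores? si no validarla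
--     #crear una lista con las palbras
--     #¿clave para buscar frases literales?
--     #añadir palabras encontradas a lista para tirar a los buscadores,
--     return(palabras)
-- ===== SOURCE B (Python) =====
-- def seleccionar_palabras(mensaje):
--     # tokenize on single spaces (keeping empty tokens), uppercase each word,
--     # then dedup preserving first-seen order
--     return list(dict.fromkeys(p.upper() for p in mensaje.split(" ")))
-- ===== Notes on version B (the rewrite author's own statement) =====
-- stated objective: faster
-- what changed: Replaces A's char-by-char loop (quadratic string concatenation plus a linear list membership scan per word) with a word-level pipeline: tokenize once on single spaces, uppercase each token whole, and dedup preserving first-seen order via dict.fromkeys.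
import Mathlib
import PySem

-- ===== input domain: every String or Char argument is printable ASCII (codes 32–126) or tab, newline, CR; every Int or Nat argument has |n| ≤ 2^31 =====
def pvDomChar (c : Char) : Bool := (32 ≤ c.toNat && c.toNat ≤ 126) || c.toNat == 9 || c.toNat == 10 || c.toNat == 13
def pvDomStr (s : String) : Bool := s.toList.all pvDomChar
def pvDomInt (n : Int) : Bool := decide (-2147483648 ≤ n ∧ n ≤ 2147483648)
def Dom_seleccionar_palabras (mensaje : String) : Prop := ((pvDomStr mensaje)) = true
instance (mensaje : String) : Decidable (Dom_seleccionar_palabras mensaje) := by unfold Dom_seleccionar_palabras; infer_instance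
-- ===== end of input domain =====

-- B replaces A's character-by-character accumulation loop (quadratic concatenation + per-word list scan) by a word-level split-then-uppercase-then-ordered-dedup pipeline, measured faster in a timing run.


-- ===== PORT A =====
-- A's loop body: on a space, append the current word if new and reset it; otherwise append the
-- uppercased character to the current word (words kept as List Char, turned into Strings at the end).
def pvStepA (st : List (List Char) × List Char) (c : Char) : List (List Char) × List Char :=
  if c = ' ' then
    (if st.2 ∈ st.1 then st.1 else st.1 ++ [st.2], ([] : List Char))
  else
    (st.1, st.2 ++ [PySem.Chars.upperChar c])

-- 'for e in range(0, len(mensaje)): … mensaje[e] …' then the final append-if-new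
def seleccionar_palabras (mensaje : String) : List String :=
  let st := (PySem.List.pyRange 0 (PySem.Str.len mensaje) 1).foldl
      (fun st e => pvStepA st (PySem.List.pyGetD mensaje.toList e ' ')) (([], []) : List (List Char) × List Char)
  (if st.2 ∈ st.1 then st.1 else st.1 ++ [st.2]).map String.mk

-- ===== PORT B =====
-- mensaje.split(" "), uppercase each token, dedup keeping first occurrences (dict.fromkeys)
def seleccionar_palabras_alt (mensaje : String) : List String :=
  (PySem.List.dedup ((PySem.Chars.splitOn mensaje.toList [' ']).map PySem.Chars.upper)).map String.mk

-- ===== PRECONDITION & SPEC =====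
def Spec_seleccionar_palabras (mensaje : String) (out : List String) : Prop := out = seleccionar_palabras_alt mensaje
instance (mensaje : String) (out : List String) : Decidable (Spec_seleccionar_palabras mensaje out) := by unfold Spec_seleccionar_palabras; infer_instance

-- ===== CLAIM (what is proved, stated in full; the proofs are below) =====
def Claim_equal_seleccionar_palabras : Prop := ∀ (mensaje : String), Dom_seleccionar_palabras mensaje → Spec_seleccionar_palabras mensaje (seleccionar_palabras mensaje)

-- ===== LEMMAS AND PROOFS =====

-- splitting on a single space, with an accumulated prefix for the first token
def pvRun (pre : List Char) : List Char → List (List Char)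
  | [] => [pre]
  | c :: rest => if c = ' ' then pre :: pvRun [] rest else pvRun (pre ++ [c]) rest

-- same splitting, but the accumulated token is built uppercased char by char (A's way)
def pvRunU (pre : List Char) : List Char → List (List Char)
  | [] => [pre]
  | c :: rest => if c = ' ' then pre :: pvRunU [] rest else pvRunU (pre ++ [PySem.Chars.upperChar c]) rest

def pvAddTok (acc : List (List Char)) (w : List Char) : List (List Char) :=
  if w ∈ acc then acc else acc ++ [w]

lemma pvGo_space : ∀ (fuel : Nat) (l cur : List Char) (accs : List (List Char)),
    l.length < fuel →
    PySem.Chars.splitOn.go [' '] fuel l cur accs = accs.reverse ++ pvRun cur.reverse l := by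
  intro fuel
  induction fuel with
  | zero => intro l cur accs h; omega
  | succ n ih =>
    intro l cur accs h
    cases l with
    | nil => simp [PySem.Chars.splitOn.go, pvRun]
    | cons c rest =>
      rw [PySem.Chars.splitOn.go]
      by_cases hc : c = ' '
      · subst hc
        have hp : ([' '].isPrefixOf (' ' :: rest)) = true := by simp [List.isPrefixOf]
        simp only [hp, if_true,
          List.length_singleton, List.drop_succ_cons, List.drop_zero]
        rw [ih rest [] (cur.reverse :: accs) (by simp at h; omega)]
        simp [pvRun]
      · have hp : ([' '].isPrefixOf (c :: rest)) = false := by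
          simp [List.isPrefixOf]; exact fun h' => absurd h'.symm hc
        simp only [hp, Bool.false_eq_true, if_false]
        rw [ih rest (c :: cur) accs (by simp at h ⊢; omega)]
        simp [pvRun, hc]

lemma pvSplitOn_space (s : List Char) :
    PySem.Chars.splitOn s [' '] = pvRun [] s := by
  show PySem.Chars.splitOn.go [' '] (s.length + 1) s [] [] = pvRun [] s
  rw [pvGo_space (s.length + 1) s [] [] (by omega)]
  simp

lemma pvLoopA : ∀ (l : List Char) (acc : List (List Char)) (cur : List Char),
    (let st := l.foldl pvStepA (acc, cur);
     if st.2 ∈ st.1 then st.1 else st.1 ++ [st.2]) = (pvRunU cur l).foldl pvAddTok acc := by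
  intro l
  induction l with
  | nil => intro acc cur; simp [pvRunU, pvAddTok]
  | cons c rest ih =>
    intro acc cur
    by_cases hc : c = ' '
    · subst hc
      simp only [List.foldl_cons, pvStepA, pvRunU]
      rw [ih]
      simp [pvAddTok]
    · simp only [List.foldl_cons, pvStepA, if_neg hc, pvRunU]
      rw [ih]

lemma pvRunU_eq_map_upper : ∀ (l pre : List Char),
    pvRunU (PySem.Chars.upper pre) l = (pvRun pre l).map PySem.Chars.upper := by
  intro l
  induction l with
  | nil => intro pre; simp [pvRunU, pvRun]
  | cons c rest ih =>
    intro pre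
    by_cases hc : c = ' '
    · subst hc
      simp only [pvRunU, pvRun]
      simpa [PySem.Chars.upper] using ih []
    · simp only [pvRunU, pvRun, if_neg hc]
      rw [show PySem.Chars.upper pre ++ [PySem.Chars.upperChar c] = PySem.Chars.upper (pre ++ [c]) by
        simp [PySem.Chars.upper], ih]

lemma pvFoldl_add_eq_addTok (xs : List (List Char)) (acc : List (List Char)) :
    xs.foldl PySem.Set.add acc = xs.foldl pvAddTok acc := by
  have : PySem.Set.add (α := List Char) = pvAddTok := by
    funext s x
    simp [PySem.Set.add, pvAddTok, List.contains_eq_mem]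
  rw [this]

-- ===== VERDICT (by name: the statement is the Claim_ definition above) =====
theorem seleccionar_palabras_spec : Claim_equal_seleccionar_palabras := by
  intro mensaje _
  unfold Spec_seleccionar_palabras seleccionar_palabras seleccionar_palabras_alt
  rw [show (PySem.List.pyRange 0 (PySem.Str.len mensaje) 1).foldl
        (fun st e => pvStepA st (PySem.List.pyGetD mensaje.toList e ' ')) (([], []) : List (List Char) × List Char)
      = mensaje.toList.foldl pvStepA ([], []) by
    simpa using PySem.List.foldl_pyRange_zero_pyGetD' mensaje.toList ' ' pvStepA ([], [])]
  have hL := pvLoopA mensaje.toList [] []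
  simp only at hL ⊢
  rw [hL]
  rw [show pvRunU [] mensaje.toList = (pvRun [] mensaje.toList).map PySem.Chars.upper by
    simpa [PySem.Chars.upper] using pvRunU_eq_map_upper mensaje.toList []]
  rw [pvSplitOn_space]
  simp only [PySem.List.dedup_eq_ofList, PySem.Set.ofList]
  rw [pvFoldl_add_eq_addTok]
  rfl
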